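-- pv_equiv track=rewrite | github.com/suaveshot/americal-patrol-vps | dashboard/data_collector.py | _detect_errors_in_last_run
-- ===== SOURCE A (Python) =====
-- def _detect_errors_in_last_run(lines: list[str], log_format: str) -> bool:
--     """Check if the last run block contains ERROR lines."""
--     # Find the start of the last run (look for "Starting" or "Audit started")
--     last_run_start = 0
--     for i, line in enumerate(lines):
--         if "Starting" in line or "Audit started" in line:
--             last_run_start = i
--
--     last_run_lines = lines[last_run_start:]
--     for line in last_run_lines:
--         upper = line.upper()
--         if "ERROR:" in upper or "TRACEBACK" in upper:
--             return True
--     return False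
-- ===== SOURCE B (Python) =====
-- def _detect_errors_in_last_run(lines: list[str], log_format: str) -> bool:
--     """Single backward pass: first error/marker decides."""
--     for line in reversed(lines):
--         upper = line.upper()
--         if "ERROR:" in upper or "TRACEBACK" in upper:
--             return True
--         if "Starting" in line or "Audit started" in line:
--             return False
--     return False
-- ===== Notes on version B (the rewrite author's own statement) =====
-- stated objective: simpler
-- what changed: Replaces the two forward passes (find the last run-start marker, then scan the suffix) by one backward pass from the last line that returns True on the first error line and False on the first marker line (error tested first so a marker line carrying an error still counts).
import Mathlib
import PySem

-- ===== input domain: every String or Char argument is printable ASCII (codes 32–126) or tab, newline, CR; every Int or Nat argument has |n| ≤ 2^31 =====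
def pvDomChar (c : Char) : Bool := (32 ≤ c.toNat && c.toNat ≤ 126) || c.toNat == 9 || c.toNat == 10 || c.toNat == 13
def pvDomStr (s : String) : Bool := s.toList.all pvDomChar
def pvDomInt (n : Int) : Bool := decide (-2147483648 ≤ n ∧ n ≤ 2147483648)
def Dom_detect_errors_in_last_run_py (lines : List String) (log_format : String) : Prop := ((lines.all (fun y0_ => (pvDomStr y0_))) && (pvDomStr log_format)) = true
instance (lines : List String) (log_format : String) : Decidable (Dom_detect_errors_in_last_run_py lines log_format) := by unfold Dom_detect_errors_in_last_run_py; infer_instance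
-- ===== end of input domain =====

-- B replaces A's two forward passes by ONE backward pass (error tested before the run-start marker); same result, shorter code.

-- ===== PORT A =====
-- first loop: last index of a line containing "Starting" or "Audit started" (0 if none)
def detect_errors_in_last_run_py (lines : List String) (log_format : String) : Bool :=
  let last_run_start : Int :=
    (PySem.List.enumerate lines 0).foldl
      (fun acc p =>
        if PySem.Str.isIn "Starting" p.2 || PySem.Str.isIn "Audit started" p.2 then p.1 else acc) 0
  let last_run_lines := PySem.List.slice lines (some last_run_start) none
  -- second loop with early 'return True' = any
  last_run_lines.any (fun line =>
    let upper := PySem.Str.upper line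
    PySem.Str.isIn "ERROR:" upper || PySem.Str.isIn "TRACEBACK" upper)

-- ===== PORT B =====
-- backward scan: first error line ⇒ true, else first marker line ⇒ false
def detectErrGoB : List String → Bool
  | [] => false
  | line :: rest =>
    let upper := PySem.Str.upper line
    if PySem.Str.isIn "ERROR:" upper || PySem.Str.isIn "TRACEBACK" upper then true
    else if PySem.Str.isIn "Starting" line || PySem.Str.isIn "Audit started" line then false
    else detectErrGoB rest

def detect_errors_in_last_run_py_alt (lines : List String) (log_format : String) : Bool :=
  detectErrGoB lines.reverse

-- ===== PRECONDITION & SPEC =====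
def Spec_detect_errors_in_last_run_py (lines : List String) (log_format : String) (out : Bool) : Prop := out = detect_errors_in_last_run_py_alt lines log_format
instance (lines : List String) (log_format : String) (out : Bool) : Decidable (Spec_detect_errors_in_last_run_py lines log_format out) := by unfold Spec_detect_errors_in_last_run_py; infer_instance

-- ===== CLAIM (what is proved, stated in full; the proofs are below) =====
def Claim_equal_detect_errors_in_last_run_py : Prop := ∀ (lines : List String) (log_format : String), Dom_detect_errors_in_last_run_py lines log_format → Spec_detect_errors_in_last_run_py lines log_format (detect_errors_in_last_run_py lines log_format)

-- ===== LEMMAS AND PROOFS =====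

-- abbreviations for the two tests
def pvErr (line : String) : Bool :=
  PySem.Str.isIn "ERROR:" (PySem.Str.upper line) || PySem.Str.isIn "TRACEBACK" (PySem.Str.upper line)
def pvMark (line : String) : Bool :=
  PySem.Str.isIn "Starting" line || PySem.Str.isIn "Audit started" line

def pvStart (lines : List String) : Int :=
  (PySem.List.enumerate lines 0).foldl
    (fun acc p =>
      if PySem.Str.isIn "Starting" p.2 || PySem.Str.isIn "Audit started" p.2 then p.1 else acc) 0

theorem pvStart_append (xs : List String) (x : String) :
    pvStart (xs ++ [x]) = if pvMark x then (xs.length : Int) else pvStart xs := by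
  simp [pvStart, pvMark, PySem.List.enumerate_append, PySem.List.enumerate_cons,
    PySem.List.enumerate_nil, List.foldl_append]

theorem pvStart_bounds (xs : List String) : 0 ≤ pvStart xs ∧ pvStart xs ≤ (xs.length : Int) := by
  induction xs using List.reverseRecOn with
  | nil => simp [pvStart, PySem.List.enumerate_nil]
  | append_singleton xs x ih =>
    rw [pvStart_append]
    rcases ih with ⟨h0, h1⟩
    split <;> simp <;> omega

theorem detectA_eq (lines : List String) (log_format : String) :
    detect_errors_in_last_run_py lines log_format =
      (lines.drop (pvStart lines).toNat).any pvErr := by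
  have hb := pvStart_bounds lines
  simp only [detect_errors_in_last_run_py]
  change (PySem.List.slice lines (some (pvStart lines)) none).any pvErr = _
  rw [PySem.List.slice_from _ hb.1]

theorem goB_eq (lines : List String) :
    detectErrGoB lines.reverse = (lines.drop (pvStart lines).toNat).any pvErr := by
  induction lines using List.reverseRecOn with
  | nil => simp [detectErrGoB, pvStart, PySem.List.enumerate_nil]
  | append_singleton xs x ih =>
    have hb := pvStart_bounds xs
    have hle : (pvStart xs).toNat ≤ xs.length := by omega
    have hshow : detectErrGoB (x :: xs.reverse) =
        (if pvErr x then true else if pvMark x then false else detectErrGoB xs.reverse) := rfl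
    rw [List.reverse_append, List.reverse_singleton, List.singleton_append, hshow, pvStart_append]
    by_cases hm : pvMark x
    · have hdrop : ((xs ++ [x]).drop ((xs.length : Int)).toNat) = [x] := by simp
      simp only [hm, if_true]
      rw [hdrop]
      by_cases he : pvErr x <;> simp [he]
    · have hdrop : ((xs ++ [x]).drop (pvStart xs).toNat) =
          xs.drop (pvStart xs).toNat ++ [x] := List.drop_append_of_le_length hle
      simp only [hm, if_false, Bool.false_eq_true]
      rw [hdrop, List.any_append]
      by_cases he : pvErr x <;> simp [he, ih]

-- ===== VERDICT (by name: the statement is the Claim_ definition above) =====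
theorem detect_errors_in_last_run_py_spec : Claim_equal_detect_errors_in_last_run_py := by
  intro lines log_format _
  unfold Spec_detect_errors_in_last_run_py detect_errors_in_last_run_py_alt
  rw [detectA_eq, goB_eq]
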